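-- pv_equiv track=rewrite | github.com/remegus/Git | python/HomeWork_2/zadacha_4.py | number_4
-- ===== SOURCE A (Python) =====
-- def number_4(n):
--     position = [1, 3, 6]
--     list = []
--     y = 0
--     count = 0
--     pr = 1
--     for i in range(-n, n + 1):
--         list.append(i)
--     for t in position:
--         count += 1
--     while y < count:
--         pr = list[position[y]] * pr
--         y += 1
--     return pr
-- ===== SOURCE B (Python) =====
-- def number_4(n):
--     return (1 - n) * (3 - n) * (6 - n)
-- ===== Notes on version B (the rewrite author's own statement) =====
-- stated objective: faster
-- what changed: Replaces the O(n) list construction and index-product loop with the closed-form product (1-n)*(3-n)*(6-n), since range(-n,n+1)[k] = -n+k.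
-- crash fix: For n < 3 the list range(-n,n+1) is too short for index 6 and A raises IndexError; B returns the closed-form value (1-n)*(3-n)*(6-n). — e.g. on number_4(0): A raises IndexError, B returns 18
import Mathlib
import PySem

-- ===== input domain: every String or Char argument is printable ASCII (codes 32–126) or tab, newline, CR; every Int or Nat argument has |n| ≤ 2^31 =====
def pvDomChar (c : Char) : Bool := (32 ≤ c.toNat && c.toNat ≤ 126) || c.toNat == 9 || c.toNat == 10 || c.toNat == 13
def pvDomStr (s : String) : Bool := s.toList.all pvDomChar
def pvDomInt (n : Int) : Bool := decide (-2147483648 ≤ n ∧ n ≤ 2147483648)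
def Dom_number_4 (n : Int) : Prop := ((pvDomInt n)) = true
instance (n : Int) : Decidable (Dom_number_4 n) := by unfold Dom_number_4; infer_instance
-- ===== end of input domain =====

-- B replaces A's O(n) list build and index loop with the closed-form product (1-n)*(3-n)*(6-n); faster (asymptotic).


-- ===== PORT A =====
-- the 'while y < count' loop, fuel = count - y (pyGetD: in-range under Pre_)
def number_4Loop (lst pos : List Int) : Nat → Int → Int → Int
  | 0, _, pr => pr
  | Nat.succ k, y, pr =>
      number_4Loop lst pos k (y + 1) (PySem.List.pyGetD lst (PySem.List.pyGetD pos y 0) 0 * pr)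

def number_4 (n : Int) : Int :=
  let position : List Int := [1, 3, 6]
  let lst := PySem.List.pyRange (-n) (n + 1) 1
  let count : Int := position.foldl (fun c _ => c + 1) 0
  number_4Loop lst position count.toNat 0 1

-- ===== PORT B =====
def number_4_alt (n : Int) : Int := (1 - n) * (3 - n) * (6 - n)

-- ===== PRECONDITION & SPEC =====
-- For n < 3 the list range(-n, n+1) is too short for index 6 and A raises IndexError.
def Pre_number_4 (n : Int) : Prop := 3 ≤ n
instance (n : Int) : Decidable (Pre_number_4 n) := by unfold Pre_number_4; infer_instance
def pvWitness_number_4 : Int := 3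

-- For n < 3 A raises IndexError (index 6 out of range); B returns (1-n)*(3-n)*(6-n).
def Raises_number_4 (n : Int) : Prop := n < 3
instance (n : Int) : Decidable (Raises_number_4 n) := by unfold Raises_number_4; infer_instance
def pvRaiseWitness_number_4 : Int := 0
def pvRaiseWitnessOut_number_4 : Int := 18

def Spec_number_4 (n : Int) (out : Int) : Prop := out = number_4_alt n
instance (n : Int) (out : Int) : Decidable (Spec_number_4 n out) := by unfold Spec_number_4; infer_instance

-- ===== CLAIM (what is proved, stated in full; the proofs are below) =====
def Claim_equal_number_4 : Prop := ∀ (n : Int), Dom_number_4 n → Pre_number_4 n → Spec_number_4 n (number_4 n)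
def Claim_raises_number_4 : Prop := (∀ (n : Int), Dom_number_4 n → Raises_number_4 n → ¬ Pre_number_4 n) ∧ (Dom_number_4 (pvRaiseWitness_number_4) ∧ Raises_number_4 (pvRaiseWitness_number_4) ∧ number_4_alt (pvRaiseWitness_number_4) = pvRaiseWitnessOut_number_4)

-- ===== LEMMAS AND PROOFS =====
theorem pyRange_get (n i : Int) (h : 3 ≤ n) (h0 : 0 ≤ i) (hk : i ≤ 6) :
    PySem.List.pyGetD (PySem.List.pyRange (-n) (n + 1) 1) i 0 = -n + i := by
  have hlen : (PySem.List.pyRange (-n) (n + 1) 1).length = (n + 1 - (-n)).toNat :=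
    PySem.List.length_pyRange_one _ _
  have hklen : i.toNat < (PySem.List.pyRange (-n) (n + 1) 1).length := by
    rw [hlen]; omega
  have hi : i = ((i.toNat : Nat) : Int) := by omega
  rw [hi, PySem.List.pyGetD_natCast, List.getD_eq_getElem _ _ hklen,
      PySem.List.getElem_pyRange_one]

-- ===== VERDICT (by name: the statement is the Claim_ definition above) =====
theorem number_4_spec : Claim_equal_number_4 := by
  intro n _ hpre
  unfold Spec_number_4 number_4 number_4_alt
  simp only [List.foldl]
  norm_num
  rw [show ((3:Int)).toNat = 3 by decide]
  simp only [number_4Loop]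
  rw [show PySem.List.pyGetD ([1,3,6] : List Int) 0 0 = 1 by decide,
      show PySem.List.pyGetD ([1,3,6] : List Int) (0+1) 0 = 3 by decide,
      show PySem.List.pyGetD ([1,3,6] : List Int) (0+1+1) 0 = 6 by decide,
      pyRange_get n 1 hpre (by omega) (by omega), pyRange_get n 3 hpre (by omega) (by omega),
      pyRange_get n 6 hpre (by omega) (by omega)]
  ring

@[simp] theorem number_4_raises : Claim_raises_number_4 := by
  unfold Claim_raises_number_4
  exact ⟨fun n _ h => by unfold Raises_number_4 Pre_number_4 at *; omega, by decide⟩
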